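-- pv_equiv track=rewrite | github.com/jongeunShin95/algorithm | programmers/[1차] 프렌즈4블록.py | solution
-- ===== SOURCE A (Python) =====
-- def solution(m, n, board):
--     answer = 0
--     flag = True
--     board = [list(x) for x in board]
--     dir = [[0, 1], [1, 0], [1, 1]] # (y, x) 우, 하, 오른쪽대각아래
--
--     # 현재 좌표 기준으로 2,2 탐색 / 성공 - True, 실패 - False 반환
--     def search(x, y):
--         cur = board[y][x]
--         for d in dir:
--             dx, dy = d[1] + x, d[0] + y
--             if cur != board[dy][dx]: return False
--         return True
--
--     # 내리기
--     def down():
--         for x in range(0, n):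
--             for y in range(m-2, -1, -1):
--                 if board[y][x] == '0': continue
--                 for dy in range(y+1, m):
--                     if board[dy][x] != '0': break
--                     board[dy][x] = board[dy-1][x]
--                     board[dy-1][x] = '0'
--
--     def play():
--         coordinates = []
--         cnt = 0
--         for y in range(m-1):
--             for x in range(n-1):
--                 if board[y][x] == '0': continue
--                 if search(x, y): coordinates.append([x, y])
--
--         if len(coordinates) > 0:
--             for coordinate in coordinates:
--                 x, y = coordinate
--                 if board[y][x] != '0':
--                     board[y][x] = '0'
--                     cnt += 1
--                 for d in dir:
--                     dx, dy = d[1] + x, d[0] + y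
--                     if board[dy][dx] != '0':
--                         board[dy][dx] = '0'
--                         cnt += 1
--             down()
--         return cnt
--
--     while flag:
--         num = play()
--         if num > 0: answer += num
--         else: flag = False
--
--     return answer
-- ===== SOURCE B (Python) =====
-- def solution(m, n, board):
--     # the m x n window as bottom-up column stacks; empty cells ('0') are dropped,
--     # so gravity is implicit in the representation and the grid never exists
--     rows = [row[:n] for _, row in zip(range(m), board)]
--     width = min(n, max((len(row) for row in rows), default=0))
--     cols = [[row[x] for row in reversed(rows) if x < len(row) and row[x] != '0']
--             for x in range(width)]
--     total = 0
--     while True: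
--         marks = set()
--         for x in range(len(cols) - 1):
--             a, b = cols[x], cols[x + 1]
--             for i in range(min(len(a), len(b)) - 1):
--                 if a[i] == a[i + 1] == b[i] == b[i + 1]:
--                     marks.update(((x, i), (x, i + 1), (x + 1, i), (x + 1, i + 1)))
--         if not marks:
--             return total
--         total += len(marks)
--         cols = [[ch for i, ch in enumerate(c) if (x, i) not in marks]
--                 for x, c in enumerate(cols)]
-- ===== Notes on version B (the rewrite author's own statement) =====
-- stated objective: alternative
-- what changed: B never builds or mutates a grid: it parses the m-by-n window once into bottom-up column stacks that simply omit empty cells, so A's entire gravity pass (per-cell bubble-down over the grid) disappears - falling is implicit in the representation; each round it matches 2x2 blocks by comparing adjacent stacks height-by-height, collects (column, height) pairs in one set, counts them, and removes them by filtering each stack.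
-- outside the precondition, e.g. on solution(3, 2, ['AA', '00', 'AA']): A returns 0, B returns 4; on solution(2, 3, ['00', '00']): A returns 0, B returns 0
import Mathlib
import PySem

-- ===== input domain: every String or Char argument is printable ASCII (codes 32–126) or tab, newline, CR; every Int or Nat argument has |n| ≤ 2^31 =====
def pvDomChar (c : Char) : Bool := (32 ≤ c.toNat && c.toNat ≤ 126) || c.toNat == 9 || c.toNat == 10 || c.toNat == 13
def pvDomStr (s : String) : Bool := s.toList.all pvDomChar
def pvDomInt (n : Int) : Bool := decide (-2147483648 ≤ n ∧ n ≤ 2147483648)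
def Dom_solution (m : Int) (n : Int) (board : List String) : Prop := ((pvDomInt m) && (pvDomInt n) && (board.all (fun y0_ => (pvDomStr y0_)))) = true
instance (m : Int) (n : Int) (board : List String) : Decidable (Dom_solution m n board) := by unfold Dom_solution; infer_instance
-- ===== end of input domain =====

-- B replaces A's grid simulation by bottom-up column stacks that drop empty cells, so the
-- gravity pass disappears entirely; equivalence of the return value is proved on Pre_.

-- shared grid primitive (Python's board[y][x] reads / writes on a list-of-lists)
abbrev Grid : Type := List (List Char)

def gget (g : Grid) (y x : Int) : Char :=
  PySem.List.pyGetD (PySem.List.pyGetD g y []) x '0'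

def gset (g : Grid) (y x : Int) (c : Char) : Grid :=
  PySem.List.pySetD g y (PySem.List.pySetD (PySem.List.pyGetD g y []) x c)

-- ===== PORT A =====

def dirA : List (Int × Int) := [(0, 1), (1, 0), (1, 1)]

-- search(x, y): the 2x2 block at (y, x) is uniform
def searchA (g : Grid) (x y : Int) : Bool :=
  let cur := gget g y x
  dirA.all (fun d => cur == gget g (d.1 + y) (d.2 + x))

-- the inner 'for dy in range(y+1, m): if ...: break; swap' loop of down()
def slideA (x : Int) (g : Grid) : List Int → Grid
  | [] => g
  | dy :: rest =>
    if gget g dy x != '0' then g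
    else slideA x (gset (gset g dy x (gget g (dy - 1) x)) (dy - 1) x '0') rest

def downA (m n : Int) (g : Grid) : Grid :=
  (PySem.List.pyRange 0 n 1).foldl (fun g x =>
    (PySem.List.pyRange (m - 2) (-1) (-1)).foldl (fun g y =>
      if gget g y x == '0' then g
      else slideA x g (PySem.List.pyRange (y + 1) m 1)) g) g

-- body of A's clearing loop for one coordinate p = (x, y)
def clearStepA (s : Int × Grid) (p : Int × Int) : Int × Grid :=
  let s1 := if gget s.2 p.2 p.1 != '0' then (s.1 + 1, gset s.2 p.2 p.1 '0') else s
  dirA.foldl (fun s d =>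
    if gget s.2 (d.1 + p.2) (d.2 + p.1) != '0'
    then (s.1 + 1, gset s.2 (d.1 + p.2) (d.2 + p.1) '0') else s) s1

def playA (m n : Int) (g : Grid) : Int × Grid :=
  let coords : List (Int × Int) :=
    (PySem.List.pyRange 0 (m - 1) 1).foldl (fun acc y =>
      (PySem.List.pyRange 0 (n - 1) 1).foldl (fun acc x =>
        if gget g y x == '0' then acc
        else if searchA g x y then acc ++ [(x, y)] else acc) acc) []
  let s := coords.foldl clearStepA (0, g)
  if coords.length > 0 then (s.1, downA m n s.2) else s

-- 'while flag' loop; fuel only makes the loop total (one extra round per board cell suffices)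
def loopA (m n : Int) : Nat → Int → Grid → Int
  | 0, ans, _ => ans
  | fuel + 1, ans, g =>
    let r := playA m n g
    if r.1 > 0 then loopA m n fuel (ans + r.1) r.2 else ans

def solution (m : Int) (n : Int) (board : List String) : Int :=
  loopA m n (m.toNat * n.toNat + 1) 0 (board.map (fun s => s.toList))

-- ===== PORT B =====

-- zip(range(m), board) keeps exactly the first max(m, 0) rows; row[:n] is a Python slice
def bRows (m n : Int) (board : List String) : List (List Char) :=
  (board.take (max m 0).toNat).map (fun row => (PySem.Str.slice row none (some n)).toList)

-- min(n, max(row lengths, default=0)); lengths are ≥ 0, so folding max from 0 is exact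
def bWidth (n : Int) (rows : List (List Char)) : Int :=
  min n (rows.foldl (fun acc r => max acc (PySem.List.len r)) 0)

-- the column comprehension: bottom-up, guarded by x < len(row), '0' cells dropped
def bCols (m n : Int) (board : List String) : List (List Char) :=
  let rows := bRows m n board
  (PySem.List.pyRange 0 (bWidth n rows) 1).map (fun x =>
    ((rows.reverse.filter (fun row =>
        decide (x < (row.length : Int)) && (PySem.List.pyGetD row x '0' != '0'))).map
      (fun row => PySem.List.pyGetD row x '0')))

def bBlock (x i : Int) : List (Int × Int) := [(x, i), (x, i + 1), (x + 1, i), (x + 1, i + 1)]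

-- the chained comparison a[i] == a[i+1] == b[i] == b[i+1]
def bPairCond (a b : List Char) (i : Int) : Bool :=
  PySem.List.pyGetD a i '0' == PySem.List.pyGetD a (i + 1) '0' &&
  PySem.List.pyGetD a (i + 1) '0' == PySem.List.pyGetD b i '0' &&
  PySem.List.pyGetD b i '0' == PySem.List.pyGetD b (i + 1) '0'

def bMarks (cols : List (List Char)) : PySem.Set (Int × Int) :=
  (PySem.List.pyRange 0 ((cols.length : Int) - 1) 1).foldl (fun s x =>
    let a := PySem.List.pyGetD cols x []
    let b := PySem.List.pyGetD cols (x + 1) []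
    (PySem.List.pyRange 0 (min (PySem.List.len a) (PySem.List.len b) - 1) 1).foldl (fun s i =>
      if bPairCond a b i then PySem.Set.update s (bBlock x i) else s) s) PySem.Set.empty

def bFilterCols (marks : PySem.Set (Int × Int)) (cols : List (List Char)) : List (List Char) :=
  (PySem.List.enumerate cols).map (fun xc =>
    ((PySem.List.enumerate xc.2).filter
        (fun ic => !(PySem.Set.contains marks (xc.1, ic.1)))).map (fun ic => ic.2))

-- 'while True' loop; fuel only makes the loop total (each round removes at least one stone)
def loopB : Nat → Int → List (List Char) → Int
  | 0, total, _ => total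
  | fuel + 1, total, cols =>
    let marks := bMarks cols
    if marks = [] then total
    else loopB fuel (total + PySem.Set.len marks) (bFilterCols marks cols)

def solution_alt (m : Int) (n : Int) (board : List String) : Int :=
  loopB (m.toNat * n.toNat + 1) 0 (bCols m n board)

-- ===== PRECONDITION & SPEC =====

-- Pre_ restricts to the problem's natural domain and to boards A accepts: when m, n ≥ 2 it
-- excludes (a) boards that do not fully cover the m×n window — there A indexes past the end
-- of board (or of a row) and raises IndexError, except on a few boards where '0' cells
-- short-circuit the scan and A still returns 0 — and (b) windows containing the reserved
-- empty-cell sentinel '0' (outside the problem's block alphabet): A treats those as floating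
-- holes that never fall, B's column stacks drop them and let the stones above fall.
def Pre_solution (m : Int) (n : Int) (board : List String) : Prop :=
  m ≤ 1 ∨ n ≤ 1 ∨
    (m ≤ (board.length : Int) ∧
      ∀ s ∈ board.take m.toNat, n ≤ (s.length : Int) ∧ '0' ∉ s.toList.take n.toNat)
instance (m : Int) (n : Int) (board : List String) : Decidable (Pre_solution m n board) := by
  unfold Pre_solution; infer_instance

def pvWitness_solution : Int × Int × List String := (2, 2, ["AB", "BA"])

def Spec_solution (m : Int) (n : Int) (board : List String) (out : Int) : Prop :=
  out = solution_alt m n board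
instance (m : Int) (n : Int) (board : List String) (out : Int) :
    Decidable (Spec_solution m n board out) := by unfold Spec_solution; infer_instance

-- ===== CLAIM (what is proved, stated in full; the proofs are below) =====
def Claim_equal_solution : Prop := ∀ (m : Int) (n : Int) (board : List String),
  Dom_solution m n board → Pre_solution m n board → Spec_solution m n board (solution m n board)

-- ===== LEMMAS AND PROOFS =====

-- Nat-index views of the grid primitives
def ggetN (g : Grid) (y x : Nat) : Char := (g.getD y []).getD x '0'
def gsetN (g : Grid) (y x : Nat) (c : Char) : Grid := g.set y ((g.getD y []).set x c)

lemma gget_natCast (g : Grid) (y x : Nat) : gget g (y : Int) (x : Int) = ggetN g y x := by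
  simp [gget, ggetN]

lemma gset_natCast (g : Grid) (y x : Nat) (c : Char) :
    gset g (y : Int) (x : Int) c = gsetN g y x c := by
  simp [gset, gsetN]

lemma length_gsetN (g : Grid) (y x : Nat) (c : Char) : (gsetN g y x c).length = g.length := by
  simp [gsetN]

lemma getD_gsetN_ne (g : Grid) {y y' : Nat} (x : Nat) (c : Char) (h : y' ≠ y) :
    (gsetN g y x c).getD y' [] = g.getD y' [] := by
  simp [gsetN, List.getD_eq_getElem?_getD, List.getElem?_set_ne (show y ≠ y' by omega)]

lemma getD_gsetN_self (g : Grid) {y : Nat} (x : Nat) (c : Char) (hy : y < g.length) :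
    (gsetN g y x c).getD y [] = (g.getD y []).set x c := by
  simp [gsetN, List.getD_eq_getElem?_getD, List.getElem?_set_self hy]

lemma rowlen_gsetN (g : Grid) (y x : Nat) (c : Char) (i : Nat) :
    ((gsetN g y x c).getD i []).length = (g.getD i []).length := by
  by_cases h : i = y
  · subst h
    by_cases hy : i < g.length
    · rw [getD_gsetN_self g x c hy, List.length_set]
    · unfold gsetN
      rw [List.set_eq_of_length_le (show g.length ≤ i by omega)]
  · rw [getD_gsetN_ne g x c h]

lemma ggetN_gsetN_self (g : Grid) {y x : Nat} (c : Char) (hy : y < g.length)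
    (hx : x < (g.getD y []).length) : ggetN (gsetN g y x c) y x = c := by
  unfold ggetN
  rw [getD_gsetN_self g x c hy, List.getD_eq_getElem?_getD, List.getElem?_set_self hx]
  rfl

lemma ggetN_gsetN_ne (g : Grid) {y x y' x' : Nat} (c : Char) (h : y' ≠ y ∨ x' ≠ x) :
    ggetN (gsetN g y x c) y' x' = ggetN g y' x' := by
  rcases h with h | h
  · unfold ggetN
    rw [getD_gsetN_ne g x c h]
  · by_cases hyy : y' = y
    · subst hyy
      by_cases hy : y' < g.length
      · unfold ggetN
        rw [getD_gsetN_self g x c hy, List.getD_eq_getElem?_getD,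
          List.getElem?_set_ne (show x ≠ x' by omega), ← List.getD_eq_getElem?_getD]
      · unfold ggetN gsetN
        rw [List.set_eq_of_length_le (show g.length ≤ y' by omega)]
    · unfold ggetN
      rw [getD_gsetN_ne g x c hyy]

-- well-formedness of the A-side grid over the m×n window
def WFA (M N : Nat) (g : Grid) : Prop :=
  M ≤ g.length ∧ ∀ y : Nat, y < M → N ≤ (g.getD y []).length

lemma WFA_gsetN {M N : Nat} {g : Grid} (h : WFA M N g) (y x : Nat) (c : Char) :
    WFA M N (gsetN g y x c) :=
  ⟨by rw [length_gsetN]; exact h.1, fun y' hy' => by rw [rowlen_gsetN]; exact h.2 y' hy'⟩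

-- clearGrid: the cumulative effect of A's sequential cell clearing
def clearGrid (g : Grid) (s : List (Int × Int)) : Grid :=
  s.foldl (fun h q => gset h q.1 q.2 '0') g

def InB (g : Grid) (p : Int × Int) : Prop :=
  ∃ a b : Nat, p = ((a : Int), (b : Int)) ∧ a < g.length ∧ b < (g.getD a []).length

lemma clearGrid_nil (g : Grid) : clearGrid g [] = g := rfl

lemma clearGrid_cons (g : Grid) (q : Int × Int) (t : List (Int × Int)) :
    clearGrid g (q :: t) = clearGrid (gset g q.1 q.2 '0') t := rfl

lemma clearGrid_append_singleton (g : Grid) (s : List (Int × Int)) (p : Int × Int) :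
    clearGrid g (s ++ [p]) = gset (clearGrid g s) p.1 p.2 '0' := by
  simp [clearGrid, List.foldl_append]

lemma shape_clearGrid (g : Grid) (s : List (Int × Int)) (hs : ∀ q ∈ s, InB g q) :
    (clearGrid g s).length = g.length ∧
    ∀ i : Nat, ((clearGrid g s).getD i []).length = (g.getD i []).length := by
  induction s generalizing g with
  | nil => exact ⟨rfl, fun _ => rfl⟩
  | cons q t ih =>
    obtain ⟨a, b, hq, ha, hb⟩ := hs q (by simp)
    rw [clearGrid_cons, hq, gset_natCast]
    have hs' : ∀ q' ∈ t, InB (gsetN g a b '0') q' := by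
      intro q' hq'
      obtain ⟨a', b', he, ha', hb'⟩ := hs q' (by simp [hq'])
      exact ⟨a', b', he, by rw [length_gsetN]; exact ha', by rw [rowlen_gsetN]; exact hb'⟩
    obtain ⟨h1, h2⟩ := ih (gsetN g a b '0') hs'
    refine ⟨by rw [h1, length_gsetN], fun i => by rw [h2 i, rowlen_gsetN]⟩

lemma ggetN_clearGrid (g : Grid) (s : List (Int × Int)) (hs : ∀ q ∈ s, InB g q)
    (a b : Nat) :
    ggetN (clearGrid g s) a b =
      if ((a : Int), (b : Int)) ∈ s then '0' else ggetN g a b := by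
  induction s generalizing g with
  | nil => simp [clearGrid_nil]
  | cons q t ih =>
    obtain ⟨qa, qb, hq, hqa, hqb⟩ := hs q (by simp)
    rw [clearGrid_cons, hq, gset_natCast]
    have hs' : ∀ q' ∈ t, InB (gsetN g qa qb '0') q' := by
      intro q' hq'
      obtain ⟨a', b', he, ha', hb'⟩ := hs q' (by simp [hq'])
      exact ⟨a', b', he, by rw [length_gsetN]; exact ha', by rw [rowlen_gsetN]; exact hb'⟩
    rw [ih _ hs']
    by_cases hmem : ((a : Int), (b : Int)) ∈ t
    · simp [hmem, hq]
    · by_cases heq : ((a : Int), (b : Int)) = ((qa : Int), (qb : Int))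
      · have haa : a = qa := by
          have := congrArg Prod.fst heq; simpa using this
        have hbb : b = qb := by
          have := congrArg Prod.snd heq; simpa using this
        subst haa; subst hbb
        simp [hmem, hq, heq, ggetN_gsetN_self g '0' hqa hqb]
      · have hne : a ≠ qa ∨ b ≠ qb := by
          by_contra hcon
          push Not at hcon
          exact heq (by rw [hcon.1, hcon.2])
        rw [ggetN_gsetN_ne g '0' hne]
        simp [hmem, hq, heq]

-- A's effective per-cell scan condition, and the list of matched coordinates / cells
def condA (g : Grid) (y x : Int) : Bool := gget g y x != '0' && searchA g x y

def blockCellsB (y x : Int) : List (Int × Int) :=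
  [(y, x), (y, x + 1), (y + 1, x), (y + 1, x + 1)]

def coordsList (m n : Int) (g : Grid) : List (Int × Int) :=
  (PySem.List.pyRange 0 (m - 1) 1).flatMap (fun y =>
    ((PySem.List.pyRange 0 (n - 1) 1).filter (condA g y)).map (fun x => (x, y)))

def cellsList (m n : Int) (g : Grid) : List (Int × Int) :=
  (coordsList m n g).flatMap (fun p => blockCellsB p.2 p.1)

lemma coords_foldl_eq (m n : Int) (g : Grid) :
    (PySem.List.pyRange 0 (m - 1) 1).foldl (fun acc y =>
      (PySem.List.pyRange 0 (n - 1) 1).foldl (fun acc x =>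
        if gget g y x == '0' then acc
        else if searchA g x y then acc ++ [(x, y)] else acc) acc) []
    = coordsList m n g := by
  have hinner : ∀ (y : Int) (acc : List (Int × Int)),
      (PySem.List.pyRange 0 (n - 1) 1).foldl (fun acc x =>
        if gget g y x == '0' then acc
        else if searchA g x y then acc ++ [(x, y)] else acc) acc
      = acc ++ ((PySem.List.pyRange 0 (n - 1) 1).filter (condA g y)).map (fun x => (x, y)) := by
    intro y acc
    rw [← PySem.List.foldl_append_if (p := condA g y) (f := fun x => (x, y))]
    apply PySem.List.foldl_congr_mem
    intro acc' x _
    by_cases h1 : (gget g y x == '0') = true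
    · have heq : gget g y x = '0' := by simpa using h1
      have hc : condA g y x = false := by simp [condA, heq]
      simp [h1, hc]
    · by_cases h2 : searchA g x y = true
      · have hc : condA g y x = true := by
          simp only [condA, Bool.and_eq_true, bne_iff_ne]
          exact ⟨by simpa using h1, h2⟩
        simp [h1, h2, hc]
      · have hc : condA g y x = false := by
          simp [condA, h2]
        simp [h1, h2, hc]
  have houter := PySem.List.foldl_congr_mem
    (l := PySem.List.pyRange 0 (m - 1) 1)
    (init := ([] : List (Int × Int)))
    (f := fun acc y => (PySem.List.pyRange 0 (n - 1) 1).foldl (fun acc x =>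
        if gget g y x == '0' then acc
        else if searchA g x y then acc ++ [(x, y)] else acc) acc)
    (g := fun acc y =>
        acc ++ ((PySem.List.pyRange 0 (n - 1) 1).filter (condA g y)).map (fun x => (x, y)))
    (fun acc y _ => hinner y acc)
  rw [houter, PySem.List.foldl_append_eq_flatMap]
  rfl

-- the four-corner characterisation of A's scan condition
lemma cond4_eq (g : Grid) (y x : Int) :
    (gget g y x != '0' && gget g y x == gget g y (x + 1) && gget g y x == gget g (y + 1) x
      && gget g y x == gget g (y + 1) (x + 1)) = condA g y x := by
  simp only [condA, searchA, dirA, List.all_cons, List.all_nil, Bool.and_true, zero_add]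
  rw [show (1 : Int) + y = y + 1 by ring, show (1 : Int) + x = x + 1 by ring,
    Bool.and_assoc, Bool.and_assoc]

lemma foldl_update_eq (l : List Int) (f : Int → List (Int × Int))
    (s : PySem.Set (Int × Int)) :
    l.foldl (fun s y => PySem.Set.update s (f y)) s = PySem.Set.update s (l.flatMap f) := by
  induction l generalizing s with
  | nil => simp [PySem.Set.update_nil]
  | cons a t ih =>
    rw [List.foldl_cons, List.flatMap_cons, PySem.Set.update_append, ih]

lemma foldl_update_ite_eq (l : List Int) (p : Int → Bool)
    (f : Int → List (Int × Int)) (s : PySem.Set (Int × Int)) :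
    l.foldl (fun s y => if p y then PySem.Set.update s (f y) else s) s
      = PySem.Set.update s ((l.filter p).flatMap f) := by
  rw [PySem.List.foldl_if_eq_foldl_filter]
  exact foldl_update_eq _ _ _

lemma cellsList_eq' (m n : Int) (g : Grid) :
    cellsList m n g = (PySem.List.pyRange 0 (m - 1) 1).flatMap (fun y =>
      ((PySem.List.pyRange 0 (n - 1) 1).filter (condA g y)).flatMap
        (fun x => blockCellsB y x)) := by
  unfold cellsList coordsList
  rw [List.flatMap_assoc]
  congr 1
  funext y
  rw [List.flatMap_map]

lemma mem_coordsList {m n : Int} {g : Grid} {q : Int × Int} (h : q ∈ coordsList m n g) :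
    0 ≤ q.2 ∧ q.2 < m - 1 ∧ 0 ≤ q.1 ∧ q.1 < n - 1 ∧ condA g q.2 q.1 = true := by
  unfold coordsList at h
  simp only [List.mem_flatMap, List.mem_map, List.mem_filter,
    PySem.List.mem_pyRange_one] at h
  obtain ⟨y, ⟨hy0, hy1⟩, x, ⟨⟨hx0, hx1⟩, hc⟩, rfl⟩ := h
  exact ⟨hy0, hy1, hx0, hx1, hc⟩

lemma condA_block {g : Grid} {y x : Int} (hc : condA g y x = true) :
    ∀ p ∈ blockCellsB y x, gget g p.1 p.2 = gget g y x ∧ gget g y x ≠ '0' := by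
  have hc' := hc
  simp only [condA, searchA, dirA, List.all_cons, List.all_nil, Bool.and_true,
    Bool.and_eq_true, bne_iff_ne, beq_iff_eq, zero_add] at hc'
  obtain ⟨hne, h1, h2, h3⟩ := hc'
  rw [show (1 : Int) + y = y + 1 by ring, show (1 : Int) + x = x + 1 by ring] at *
  intro p hp
  simp only [blockCellsB, List.mem_cons, List.not_mem_nil, or_false] at hp
  rcases hp with rfl | rfl | rfl | rfl
  · exact ⟨rfl, hne⟩
  · exact ⟨h1.symm, hne⟩
  · exact ⟨h2.symm, hne⟩
  · exact ⟨h3.symm, hne⟩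

lemma cells_mem {M N : Nat} {m n : Int} {g : Grid} (hm : m = (M : Int)) (hn : n = (N : Int))
    (hWF : WFA M N g) :
    ∀ p ∈ cellsList m n g, InB g p ∧ gget g p.1 p.2 ≠ '0' := by
  intro p hp
  unfold cellsList at hp
  simp only [List.mem_flatMap] at hp
  obtain ⟨q, hq, hpq⟩ := hp
  obtain ⟨hy0, hy1, hx0, hx1, hc⟩ := mem_coordsList hq
  obtain ⟨hval, hne⟩ := condA_block hc p hpq
  refine ⟨?_, by rw [hval]; exact hne⟩
  have hyx : (p.1 = q.2 ∨ p.1 = q.2 + 1) ∧ (p.2 = q.1 ∨ p.2 = q.1 + 1) := by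
    simp only [blockCellsB, List.mem_cons, List.not_mem_nil, or_false] at hpq
    rcases hpq with rfl | rfl | rfl | rfl <;> simp
  have hp1 : 0 ≤ p.1 ∧ p.1 < (M : Int) := by rcases hyx.1 with h | h <;> omega
  have hp2 : 0 ≤ p.2 ∧ p.2 < (N : Int) := by rcases hyx.2 with h | h <;> omega
  refine ⟨p.1.toNat, p.2.toNat, ?_, ?_, ?_⟩
  · rw [Int.toNat_of_nonneg hp1.1, Int.toNat_of_nonneg hp2.1]
  · have h1 := hWF.1
    omega
  · have h2 := hWF.2 p.1.toNat (by omega)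
    omega

-- per-cell clearing step (the body of A's conditional clear, one cell at a time)
def cellStep (s : Int × Grid) (p : Int × Int) : Int × Grid :=
  if gget s.2 p.1 p.2 != '0' then (s.1 + 1, gset s.2 p.1 p.2 '0') else s

lemma clearStepA_eq (s : Int × Grid) (p : Int × Int) :
    clearStepA s p = (blockCellsB p.2 p.1).foldl cellStep s := by
  simp only [clearStepA, blockCellsB, cellStep, dirA, List.foldl_cons, List.foldl_nil,
    zero_add]
  rw [show (1 : Int) + p.2 = p.2 + 1 by ring, show (1 : Int) + p.1 = p.1 + 1 by ring]

lemma coords_fold_to_cells (coords : List (Int × Int)) (s0 : Int × Grid) :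
    coords.foldl clearStepA s0
      = (coords.flatMap (fun p => blockCellsB p.2 p.1)).foldl cellStep s0 := by
  rw [List.foldl_flatMap]
  apply PySem.List.foldl_congr_mem
  intro acc p _
  rw [clearStepA_eq]

lemma clearFold_spec (g : Grid) :
    ∀ (cells : List (Int × Int)) (s0 : PySem.Set (Int × Int)) (cnt0 : Int),
    (∀ p ∈ cells, InB g p ∧ gget g p.1 p.2 ≠ '0') →
    (∀ p ∈ s0, InB g p) →
    cells.foldl cellStep (cnt0, clearGrid g s0) =
      (cnt0 + ((PySem.Set.update s0 cells).length : Int) - (s0.length : Int),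
       clearGrid g (PySem.Set.update s0 cells)) := by
  intro cells
  induction cells with
  | nil =>
    intro s0 cnt0 _ _
    simp [PySem.Set.update_nil]
  | cons p t ih =>
    intro s0 cnt0 hcells hs0
    obtain ⟨hinb, hnz⟩ := hcells p (by simp)
    obtain ⟨a, b, hpab, ha, hb⟩ := hinb
    have hread : gget (clearGrid g s0) p.1 p.2 = if p ∈ s0 then '0' else gget g p.1 p.2 := by
      rw [hpab]
      show gget (clearGrid g s0) ((a : Int), (b : Int)).1 ((a : Int), (b : Int)).2 = _
      simp only []
      rw [gget_natCast, ggetN_clearGrid g s0 hs0 a b, ← hpab, gget_natCast]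
    rw [List.foldl_cons, PySem.Set.update_cons]
    by_cases hmem : p ∈ s0
    · have hstep : cellStep (cnt0, clearGrid g s0) p = (cnt0, clearGrid g s0) := by
        unfold cellStep
        rw [hread]
        simp [hmem]
      rw [hstep, PySem.Set.add_of_mem hmem]
      exact ih s0 cnt0 (fun q hq => hcells q (by simp [hq])) hs0
    · have hstep : cellStep (cnt0, clearGrid g s0) p
          = (cnt0 + 1, clearGrid g (s0 ++ [p])) := by
        unfold cellStep
        rw [hread]
        simp only [hmem, if_false]
        rw [clearGrid_append_singleton]
        simp [hnz]
      rw [hstep, PySem.Set.add_of_not_mem hmem]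
      have hs0' : ∀ q ∈ s0 ++ [p], InB g q := by
        intro q hq
        rcases List.mem_append.mp hq with h | h
        · exact hs0 q h
        · simp at h; subst h; exact ⟨a, b, hpab, ha, hb⟩
      rw [ih (s0 ++ [p]) (cnt0 + 1) (fun q hq => hcells q (by simp [hq])) hs0']
      refine Prod.ext ?_ rfl
      show cnt0 + 1 + _ - _ = cnt0 + _ - _
      simp only [List.length_append, List.length_cons, List.length_nil]
      push_cast
      ring

lemma cells_nil_iff (m n : Int) (g : Grid) :
    cellsList m n g = [] ↔ coordsList m n g = [] := by
  unfold cellsList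
  rw [List.flatMap_eq_nil_iff]
  constructor
  · intro h
    by_contra hne
    obtain ⟨q, hq⟩ := List.exists_mem_of_ne_nil _ hne
    exact absurd (h q hq) (by simp [blockCellsB])
  · intro h
    rw [h]
    simp

lemma playA_spec {M N : Nat} {m n : Int} {g : Grid} (hm : m = (M : Int)) (hn : n = (N : Int))
    (hWF : WFA M N g) :
    playA m n g = if cellsList m n g = []
      then (0, g)
      else (((PySem.Set.ofList (cellsList m n g)).length : Int),
            downA m n (clearGrid g (PySem.Set.ofList (cellsList m n g)))) := by
  have hfold := clearFold_spec g (cellsList m n g) [] 0 (cells_mem hm hn hWF) (by simp)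
  rw [PySem.Set.update_nil_left] at hfold
  have hfold' : (cellsList m n g).foldl cellStep (0, g)
      = (((PySem.Set.ofList (cellsList m n g)).length : Int),
         clearGrid g (PySem.Set.ofList (cellsList m n g))) := by
    rw [show ((0 : Int), g) = (0, clearGrid g []) from rfl, hfold]
    simp
  simp only [playA]
  rw [coords_foldl_eq, coords_fold_to_cells,
    show (coordsList m n g).flatMap (fun p => blockCellsB p.2 p.1) = cellsList m n g from rfl,
    hfold']
  by_cases hnil : cellsList m n g = []
  · have hco : coordsList m n g = [] := (cells_nil_iff m n g).mp hnil
    rw [if_pos hnil, hco]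
    simp [hnil, clearGrid_nil]
  · have hco : coordsList m n g ≠ [] := fun h => hnil ((cells_nil_iff m n g).mpr h)
    rw [if_neg hnil, if_pos (by simpa [List.length_pos_iff] using hco)]

-- ===== gravity: pure column programs =====

def keepF (c : List Char) : List Char := c.filter (fun ch => ch != '0')

def settle (c : List Char) : List Char :=
  List.replicate (c.length - (keepF c).length) '0' ++ keepF c

def slideC (c : List Char) : List Int → List Char
  | [] => c
  | dy :: rest =>
    if PySem.List.pyGetD c dy '0' != '0' then c
    else slideC (PySem.List.pySetD (PySem.List.pySetD c dy (PySem.List.pyGetD c (dy - 1) '0'))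
      (dy - 1) '0') rest

def bstepC (m : Int) (c : List Char) (y : Int) : List Char :=
  if PySem.List.pyGetD c y '0' == '0' then c else slideC c (PySem.List.pyRange (y + 1) m 1)

lemma length_keepF_le (c : List Char) : (keepF c).length ≤ c.length :=
  List.length_filter_le _ _

lemma settle_singleton (a : Char) : settle [a] = [a] := by
  by_cases h : (a != '0') = true
  · simp [settle, keepF, h]
  · have : a = '0' := by simpa using h
    subst this
    simp [settle, keepF]

lemma settle_zero_cons (t : List Char) : settle ('0' :: t) = '0' :: settle t := by
  have hk : keepF ('0' :: t) = keepF t := by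
    simp [keepF]
  unfold settle
  rw [hk, List.length_cons,
    show t.length + 1 - (keepF t).length = (t.length - (keepF t).length) + 1 by
      have := length_keepF_le t; omega,
    List.replicate_succ]
  simp

lemma pyRange_one_nil {a b : Int} (h : b ≤ a) : PySem.List.pyRange a b 1 = [] := by
  rw [PySem.List.pyRange_of_pos a b Int.one_pos, if_neg (by omega)]
  simp

lemma head_keepF_ne {t : List Char} : ∀ h ∈ (keepF t).head?, h ≠ '0' := by
  intro h hh
  have hmem : h ∈ keepF t := List.mem_of_mem_head? hh
  have := (List.mem_filter.mp hmem).2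
  simpa using this

lemma slideC_spec {M : Nat} {m : Int} (hm : m = (M : Int)) :
    ∀ (zs pre : List Char) (a : Char) (ks : List Char),
    (∀ u ∈ zs, u = '0') → (∀ h ∈ ks.head?, h ≠ '0') →
    pre.length + 1 + zs.length + ks.length = M →
    slideC (pre ++ a :: (zs ++ ks)) (PySem.List.pyRange ((pre.length : Int) + 1) m 1)
      = pre ++ zs ++ a :: ks := by
  intro zs
  induction zs with
  | nil =>
    intro pre a ks _ hk hlen
    cases ks with
    | nil =>
      rw [pyRange_one_nil (by rw [hm]; simp at hlen; omega)]
      simp [slideC]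
    | cons h t =>
      have hlt : (pre.length : Int) + 1 < m := by
        rw [hm]; simp at hlen; omega
      rw [PySem.List.pyRange_one_cons hlt]
      have hidx : ((pre.length : Int) + 1) = ((pre.length + 1 : Nat) : Int) := by push_cast; ring
      have hget : PySem.List.pyGetD (pre ++ a :: ([] ++ h :: t)) ((pre.length : Int) + 1) '0' = h := by
        rw [hidx, PySem.List.pyGetD_natCast, List.getD_eq_getElem?_getD,
          List.getElem?_append_right (by omega)]
        simp
      rw [slideC, hget, if_pos (by simpa using hk h rfl)]
      simp
  | cons z zs' ih =>
    intro pre a ks hz hk hlen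
    have hz0 : z = '0' := hz z (by simp)
    subst hz0
    have hlt : (pre.length : Int) + 1 < m := by
      rw [hm]; simp at hlen; omega
    rw [PySem.List.pyRange_one_cons hlt]
    have hidx1 : ((pre.length : Int) + 1) = ((pre.length + 1 : Nat) : Int) := by push_cast; ring
    have hgetz : PySem.List.pyGetD (pre ++ a :: ('0' :: zs' ++ ks)) ((pre.length : Int) + 1) '0' = '0' := by
      rw [hidx1, PySem.List.pyGetD_natCast, List.getD_eq_getElem?_getD,
        List.getElem?_append_right (by omega)]
      simp
    have hgeta : PySem.List.pyGetD (pre ++ a :: ('0' :: zs' ++ ks)) ((pre.length : Int) + 1 - 1) '0' = a := by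
      rw [show (pre.length : Int) + 1 - 1 = ((pre.length : Nat) : Int) by ring,
        PySem.List.pyGetD_natCast, List.getD_eq_getElem?_getD,
        List.getElem?_append_right (by omega)]
      simp
    rw [slideC, hgetz, if_neg (by simp), hgeta]
    have hset : PySem.List.pySetD (PySem.List.pySetD (pre ++ a :: ('0' :: zs' ++ ks))
        ((pre.length : Int) + 1) a) ((pre.length : Int) + 1 - 1) '0'
        = (pre ++ ['0']) ++ a :: (zs' ++ ks) := by
      rw [hidx1, PySem.List.pySetD_natCast,
        show ((pre.length + 1 : Nat) : Int) - 1 = ((pre.length : Nat) : Int) by push_cast; ring,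
        PySem.List.pySetD_natCast]
      rw [List.set_append, if_neg (by omega)]
      rw [List.set_append, if_neg (by omega)]
      simp
    rw [hset]
    have hres := ih (pre ++ ['0']) a ks (fun u hu => hz u (by simp [hu])) hk
      (by simp at hlen ⊢; omega)
    rw [show ((pre ++ ['0']).length : Int) = (pre.length : Int) + 1 by simp] at hres
    rw [show (pre.length : Int) + 1 + 1 = (pre.length : Int) + 1 + 1 from rfl]
    rw [hres]
    simp

lemma bstep_fold_inv {M : Nat} {m : Int} (hm : m = (M : Int)) (hM : 2 ≤ M)
    (col : List Char) (hc : col.length = M) :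
    ∀ j, j ≤ M - 1 →
    (List.range j).foldl (fun col (k : Nat) => bstepC m col (m - 2 - (k : Int))) col
      = col.take (M - 1 - j) ++ settle (col.drop (M - 1 - j)) := by
  intro j
  induction j with
  | zero =>
    intro _
    have hlt : M - 1 < col.length := by omega
    have h1 : col.drop (M - 1) = [col[M - 1]] := by
      have h3 : col.drop (M - 1 + 1) = [] := by
        rw [show M - 1 + 1 = M by omega, ← hc]
        exact List.drop_length
      rw [List.drop_eq_getElem_cons hlt, h3]
    rw [List.range_zero, List.foldl_nil, Nat.sub_zero, h1, settle_singleton]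
    conv_lhs => rw [← List.take_append_drop (M - 1) col]
    rw [h1]
  | succ j ihj =>
    intro hj1
    have hj : j ≤ M - 1 := by omega
    rw [List.range_succ, List.foldl_append, ihj hj, List.foldl_cons, List.foldl_nil]
    have hij : M - 1 - j = (M - 2 - j) + 1 := by omega
    set i := M - 2 - j with hidef
    have hiM : i + 1 < M := by omega
    have hiM' : i < col.length := by omega
    have harg : m - 2 - (j : Int) = ((i : Nat) : Int) := by rw [hm]; omega
    rw [hij, harg, show M - 1 - (j + 1) = i from by omega]
    have hread : PySem.List.pyGetD (col.take (i + 1) ++ settle (col.drop (i + 1)))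
        (((i : Nat) : Int)) '0' = col[i] := by
      rw [PySem.List.pyGetD_natCast, List.getD_eq_getElem?_getD,
        List.getElem?_append_left (by simp; omega),
        List.getElem?_take_of_lt (by omega), List.getElem?_eq_getElem hiM']
      rfl
    have hsplit : col.take (i + 1) = col.take i ++ [col[i]] := by
      rw [List.take_add_one, List.getElem?_eq_getElem hiM']
      rfl
    have hdropi : col.drop i = col[i] :: col.drop (i + 1) := List.drop_eq_getElem_cons hiM'
    unfold bstepC
    rw [hread]
    by_cases hz : col[i] = '0'
    · rw [if_pos (by simp [hz])]
      rw [hdropi, hz, settle_zero_cons, hsplit, hz]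
      simp
    · rw [if_neg (by simp [hz])]
      have hklen : (keepF (col.drop (i + 1))).length ≤ M - (i + 1) := by
        have h := length_keepF_le (col.drop (i + 1))
        rw [List.length_drop, hc] at h
        exact h
      have hsettle : settle (col.drop (i + 1))
          = List.replicate ((M - (i + 1)) - (keepF (col.drop (i + 1))).length) '0'
            ++ keepF (col.drop (i + 1)) := by
        unfold settle
        rw [List.length_drop, hc]
      have hcomb : col.take (i + 1) ++ settle (col.drop (i + 1))
          = col.take i ++ col[i] :: (List.replicate ((M - (i + 1)) - (keepF (col.drop (i + 1))).length) '0'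
            ++ keepF (col.drop (i + 1))) := by
        rw [hsplit, hsettle]
        simp only [List.append_assoc, List.singleton_append]
      rw [hcomb]
      have hspec := slideC_spec hm
        (List.replicate ((M - (i + 1)) - (keepF (col.drop (i + 1))).length) '0')
        (col.take i) col[i] (keepF (col.drop (i + 1)))
        (fun u hu => List.eq_of_mem_replicate hu) head_keepF_ne
        (by simp [List.length_take]; omega)
      rw [show ((col.take i).length : Int) = ((i : Nat) : Int) by
        rw [List.length_take, Nat.min_eq_left (by omega)]] at hspec
      rw [hspec]
      have hkeep : keepF (col.drop i) = col[i] :: keepF (col.drop (i + 1)) := by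
        unfold keepF
        rw [hdropi, List.filter_cons, if_pos (by simp [hz])]
      have hset : settle (col.drop i)
          = List.replicate ((M - (i + 1)) - (keepF (col.drop (i + 1))).length) '0'
            ++ col[i] :: keepF (col.drop (i + 1)) := by
        unfold settle
        rw [hkeep, List.length_drop, hc, List.length_cons,
          show (M - i) - ((keepF (col.drop (i + 1))).length + 1)
            = (M - (i + 1)) - (keepF (col.drop (i + 1))).length by omega]
      rw [hset]
      simp

lemma getD_set_self (l : List Char) {i : Nat} (a : Char) (h : i < l.length) :
    (l.set i a).getD i '0' = a := by
  rw [List.getD_eq_getElem?_getD, List.getElem?_set_self h]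
  rfl

lemma getD_set_ne (l : List Char) {i j : Nat} (a : Char) (h : i ≠ j) :
    (l.set i a).getD j '0' = l.getD j '0' := by
  rw [List.getD_eq_getElem?_getD, List.getElem?_set_ne h, ← List.getD_eq_getElem?_getD]

lemma pyRangeDown {M : Nat} {m : Int} (hm : m = (M : Int)) (hM : 2 ≤ M) :
    PySem.List.pyRange (m - 2) (-1) (-1)
      = (List.range (M - 1)).map (fun k : Nat => m - 2 - (k : Int)) := by
  simp only [PySem.List.pyRange]
  rw [if_neg (by norm_num), if_neg (by norm_num), if_pos (by omega)]
  have hcount : ((m - 2 - (-1) + -(-1) - 1) / -(-1)).toNat = M - 1 := by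
    rw [hm]
    norm_num
    omega
  rw [hcount]
  have hfun : (fun k : Nat => m - 2 + (-1) * (k : Int)) = fun k : Nat => m - 2 - (k : Int) :=
    funext (fun k => by ring)
  rw [hfun]

lemma bubbleC_settle {M : Nat} {m : Int} (hm : m = (M : Int)) (hM : 2 ≤ M)
    (col : List Char) (hc : col.length = M) :
    (PySem.List.pyRange (m - 2) (-1) (-1)).foldl (bstepC m) col = settle col := by
  rw [pyRangeDown hm hM, List.foldl_map]
  have h := bstep_fold_inv hm hM col hc (M - 1) (le_refl _)
  simp only [Nat.sub_self, List.take_zero, List.drop_zero, List.nil_append] at h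
  exact h

lemma slide_sim {M N : Nat} {x : Nat} :
    ∀ (dys : List Int) (g : Grid) (c : List Char),
    WFA M N g → x < N → c.length = M →
    (∀ y : Nat, y < M → ggetN g y x = c.getD y '0') →
    (∀ dy ∈ dys, 1 ≤ dy ∧ dy < (M : Int)) →
    WFA M N (slideA (x : Int) g dys)
      ∧ (∀ y x' : Nat, x' ≠ x → ggetN (slideA (x : Int) g dys) y x' = ggetN g y x')
      ∧ (∀ y : Nat, y < M → ggetN (slideA (x : Int) g dys) y x = (slideC c dys).getD y '0')
      ∧ (slideC c dys).length = M := by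
  intro dys
  induction dys with
  | nil =>
    intro g c hWF hxN hc hcol _
    exact ⟨hWF, fun _ _ _ => rfl, fun y hy => hcol y hy, hc⟩
  | cons dy rest ih =>
    intro g c hWF hxN hc hcol hdys
    obtain ⟨hdy1, hdy2⟩ := hdys dy (by simp)
    have hgl := hWF.1
    set d : Nat := dy.toNat with hd
    have hdy : dy = (d : Int) := by omega
    have hd1 : 1 ≤ d := by omega
    have hdM : d < M := by omega
    have hrowbound : ∀ a : Nat, a < M → x < (List.getD g a []).length := by
      intro a ha
      have := hWF.2 a ha
      omega
    have hval : gget g dy (x : Int) = c.getD d '0' := by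
      rw [hdy, gget_natCast]
      exact hcol d hdM
    have hvalC : PySem.List.pyGetD c dy '0' = c.getD d '0' := by
      rw [hdy, PySem.List.pyGetD_natCast]
    simp only [slideA, slideC]
    rw [hval, hvalC]
    by_cases hnz : (c.getD d '0' != '0') = true
    · rw [if_pos hnz, if_pos hnz]
      exact ⟨hWF, fun _ _ _ => rfl, fun y hy => hcol y hy, hc⟩
    · rw [if_neg hnz, if_neg hnz]
      have hdm1 : dy - 1 = ((d - 1 : Nat) : Int) := by omega
      have hprev : gget g (dy - 1) (x : Int) = c.getD (d - 1) '0' := by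
        rw [hdm1, gget_natCast]
        exact hcol (d - 1) (by omega)
      have hprevC : PySem.List.pyGetD c (dy - 1) '0' = c.getD (d - 1) '0' := by
        rw [hdm1, PySem.List.pyGetD_natCast]
      rw [hprev, hprevC, hdm1, hdy, gset_natCast, gset_natCast,
        PySem.List.pySetD_natCast, PySem.List.pySetD_natCast]
      set v := c.getD (d - 1) '0' with hv
      have hWF2 : WFA M N (gsetN (gsetN g d x v) (d - 1) x '0') :=
        WFA_gsetN (WFA_gsetN hWF d x v) (d - 1) x '0'
      have hc2len : ((c.set d v).set (d - 1) '0').length = M := by simp [hc]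
      have hcol2 : ∀ y : Nat, y < M →
          ggetN (gsetN (gsetN g d x v) (d - 1) x '0') y x
            = ((c.set d v).set (d - 1) '0').getD y '0' := by
        intro y hy
        by_cases h1 : y = d - 1
        · subst h1
          rw [ggetN_gsetN_self _ '0' (by rw [length_gsetN]; omega)
              (by rw [rowlen_gsetN]; exact hrowbound _ hy),
            getD_set_self _ '0' (by simp [hc]; omega)]
        · by_cases h2 : y = d
          · subst h2
            rw [ggetN_gsetN_ne _ '0' (Or.inl (by omega)),
              ggetN_gsetN_self _ v (by omega) (hrowbound _ hy),
              getD_set_ne _ '0' (by omega), getD_set_self _ v (by omega)]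
          · rw [ggetN_gsetN_ne _ '0' (Or.inl (by omega)),
              ggetN_gsetN_ne _ v (Or.inl (by omega)),
              getD_set_ne _ '0' (by omega), getD_set_ne _ v (by omega)]
            exact hcol y hy
      obtain ⟨ha, hb, hcc, hlen'⟩ := ih (gsetN (gsetN g d x v) (d - 1) x '0')
        ((c.set d v).set (d - 1) '0') hWF2 hxN hc2len hcol2
        (fun q hq => hdys q (by simp [hq]))
      refine ⟨ha, ?_, hcc, hlen'⟩
      intro y x' hx'
      rw [hb y x' hx', ggetN_gsetN_ne _ '0' (Or.inr (by omega)),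
        ggetN_gsetN_ne _ v (Or.inr (by omega))]

-- the column pass of A's down(), as a function of one column index
def colPassF (m : Int) (x : Int) (g : Grid) : Grid :=
  (PySem.List.pyRange (m - 2) (-1) (-1)).foldl (fun g y =>
    if gget g y x == '0' then g else slideA x g (PySem.List.pyRange (y + 1) m 1)) g

lemma downA_eq (m n : Int) (g : Grid) :
    downA m n g = (PySem.List.pyRange 0 n 1).foldl (fun g x => colPassF m x g) g := rfl

lemma colfold_sim {M N : Nat} {m : Int} (hm : m = (M : Int)) :
    ∀ (ys : List Int) (g : Grid) (c : List Char) (x : Nat),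
    WFA M N g → x < N → c.length = M →
    (∀ y : Nat, y < M → ggetN g y x = c.getD y '0') →
    (∀ y ∈ ys, 0 ≤ y ∧ y < (M : Int) - 1) →
    WFA M N (ys.foldl (fun g y => if gget g y (x : Int) == '0' then g
        else slideA (x : Int) g (PySem.List.pyRange (y + 1) m 1)) g)
      ∧ (∀ y x' : Nat, x' ≠ x →
          ggetN (ys.foldl (fun g y => if gget g y (x : Int) == '0' then g
            else slideA (x : Int) g (PySem.List.pyRange (y + 1) m 1)) g) y x' = ggetN g y x')
      ∧ (∀ y : Nat, y < M →
          ggetN (ys.foldl (fun g y => if gget g y (x : Int) == '0' then g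
            else slideA (x : Int) g (PySem.List.pyRange (y + 1) m 1)) g) y x
            = (ys.foldl (bstepC m) c).getD y '0')
      ∧ (ys.foldl (bstepC m) c).length = M := by
  intro ys
  induction ys with
  | nil =>
    intro g c x hWF hxN hc hcol _
    exact ⟨hWF, fun _ _ _ => rfl, fun y hy => hcol y hy, hc⟩
  | cons y0 rest ih =>
    intro g c x hWF hxN hc hcol hys
    obtain ⟨hy0a, hy0b⟩ := hys y0 (by simp)
    set a : Nat := y0.toNat with ha
    have hy0 : y0 = (a : Int) := by omega
    have haM : a < M := by omega
    have hread : gget g y0 (x : Int) = c.getD a '0' := by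
      rw [hy0, gget_natCast]
      exact hcol a haM
    have hreadC : PySem.List.pyGetD c y0 '0' = c.getD a '0' := by
      rw [hy0, PySem.List.pyGetD_natCast]
    rw [List.foldl_cons, List.foldl_cons]
    simp only [bstepC]
    rw [hread, hreadC]
    by_cases hz : (c.getD a '0' == '0') = true
    · rw [if_pos hz, if_pos hz]
      exact ih g c x hWF hxN hc hcol (fun q hq => hys q (by simp [hq]))
    · rw [if_neg hz, if_neg hz]
      have hdys : ∀ dy ∈ PySem.List.pyRange (y0 + 1) m 1, 1 ≤ dy ∧ dy < (M : Int) := by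
        intro dy hdy
        rw [PySem.List.mem_pyRange_one] at hdy
        omega
      obtain ⟨hW1, hoff1, hcol1, hlen1⟩ :=
        slide_sim (PySem.List.pyRange (y0 + 1) m 1) g c hWF hxN hc hcol hdys
      obtain ⟨hW2, hoff2, hcol2, hlen2⟩ := ih _ _ x hW1 hxN hlen1 hcol1
        (fun q hq => hys q (by simp [hq]))
      exact ⟨hW2, fun y x' hx' => (hoff2 y x' hx').trans (hoff1 y x' hx'), hcol2, hlen2⟩

lemma colPassF_sim {M N : Nat} {m : Int} (hm : m = (M : Int)) (hM : 2 ≤ M)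
    (g : Grid) (c : List Char) (x : Nat) (hWF : WFA M N g) (hxN : x < N)
    (hc : c.length = M) (hcol : ∀ y : Nat, y < M → ggetN g y x = c.getD y '0') :
    WFA M N (colPassF m (x : Int) g)
      ∧ (∀ y x' : Nat, x' ≠ x → ggetN (colPassF m (x : Int) g) y x' = ggetN g y x')
      ∧ (∀ y : Nat, y < M → ggetN (colPassF m (x : Int) g) y x = (settle c).getD y '0') := by
  have hys : ∀ y ∈ PySem.List.pyRange (m - 2) (-1) (-1), 0 ≤ y ∧ y < (M : Int) - 1 := by
    intro y hy
    rw [pyRangeDown hm hM] at hy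
    simp only [List.mem_map, List.mem_range] at hy
    obtain ⟨k, hk, rfl⟩ := hy
    omega
  obtain ⟨hW, hoff, hcol', _⟩ :=
    colfold_sim hm (PySem.List.pyRange (m - 2) (-1) (-1)) g c x hWF hxN hc hcol hys
  refine ⟨hW, hoff, ?_⟩
  intro y hy
  unfold colPassF
  rw [hcol' y hy, bubbleC_settle hm hM c hc]

lemma downA_spec {M N : Nat} {m n : Int} (hm : m = (M : Int)) (hn : n = (N : Int))
    (hM : 2 ≤ M) (g : Grid) (hWF : WFA M N g) :
    WFA M N (downA m n g)
      ∧ ∀ y x : Nat, y < M → x < N →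
          ggetN (downA m n g) y x
            = (settle ((List.range M).map (fun yy => ggetN g yy x))).getD y '0' := by
  have main : ∀ K : Nat, K ≤ N →
      WFA M N ((List.range K).foldl (fun g (k : Nat) => colPassF m ((k : Nat) : Int) g) g)
        ∧ (∀ y x' : Nat, y < M → x' < K →
            ggetN ((List.range K).foldl (fun g (k : Nat) => colPassF m ((k : Nat) : Int) g) g) y x'
              = (settle ((List.range M).map (fun yy => ggetN g yy x'))).getD y '0')
        ∧ (∀ y x' : Nat, K ≤ x' →
            ggetN ((List.range K).foldl (fun g (k : Nat) => colPassF m ((k : Nat) : Int) g) g) y x'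
              = ggetN g y x') := by
    intro K
    induction K with
    | zero =>
      intro _
      exact ⟨hWF, fun y x' _ h => absurd h (by omega), fun _ _ _ => rfl⟩
    | succ K ihK =>
      intro hK1
      obtain ⟨hW, hdone, hrest⟩ := ihK (by omega)
      rw [List.range_succ, List.foldl_append, List.foldl_cons, List.foldl_nil]
      have hcolK : ∀ y : Nat, y < M →
          ggetN ((List.range K).foldl (fun g (k : Nat) => colPassF m ((k : Nat) : Int) g) g) y K
            = ((List.range M).map (fun yy => ggetN g yy K)).getD y '0' := by
        intro y hy
        rw [PySem.List.getD_map_range _ _ _ _ hy]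
        exact hrest y K (le_refl K)
      obtain ⟨hW', hoff', hcol'⟩ := colPassF_sim hm hM _
        ((List.range M).map (fun yy => ggetN g yy K)) K hW (by omega) (by simp) hcolK
      refine ⟨hW', ?_, ?_⟩
      · intro y x' hy hx'
        by_cases hxK : x' = K
        · subst hxK
          exact hcol' y hy
        · rw [hoff' y x' hxK]
          exact hdone y x' hy (by omega)
      · intro y x' hx'
        rw [hoff' y x' (by omega)]
        exact hrest y x' (by omega)
  obtain ⟨hW, hcols, _⟩ := main N (le_refl N)
  rw [downA_eq, hn, PySem.List.pyRange_zero_natCast, List.foldl_map]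
  exact ⟨hW, fun y x hy hx => hcols y x hy hx⟩

lemma cellsList_trivial {m n : Int} (hmn : m ≤ 1 ∨ n ≤ 1) (g : Grid) :
    cellsList m n g = [] ∧ coordsList m n g = [] := by
  have hco : coordsList m n g = [] := by
    unfold coordsList
    rcases hmn with h | h
    · rw [pyRange_one_nil (by omega : m - 1 ≤ 0)]
      rfl
    · rw [pyRange_one_nil (by omega : n - 1 ≤ 0)]
      simp
  exact ⟨by unfold cellsList; rw [hco]; rfl, hco⟩

lemma playA_trivial {m n : Int} (hmn : m ≤ 1 ∨ n ≤ 1) (g : Grid) : playA m n g = (0, g) := by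
  obtain ⟨hcells, hco⟩ := cellsList_trivial hmn g
  simp only [playA]
  rw [coords_foldl_eq, coords_fold_to_cells,
    show (coordsList m n g).flatMap (fun p => blockCellsB p.2 p.1) = cellsList m n g from rfl,
    hcells, hco]
  simp

-- ===== B side: column stacks =====

def bCellsList (cols : List (List Char)) : List (Int × Int) :=
  (PySem.List.pyRange 0 ((cols.length : Int) - 1) 1).flatMap (fun x =>
    ((PySem.List.pyRange 0 (min (PySem.List.len (PySem.List.pyGetD cols x []))
        (PySem.List.len (PySem.List.pyGetD cols (x + 1) [])) - 1) 1).filter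
      (bPairCond (PySem.List.pyGetD cols x []) (PySem.List.pyGetD cols (x + 1) []))).flatMap
      (fun i => bBlock x i))

lemma bMarks_eq (cols : List (List Char)) :
    bMarks cols = PySem.Set.ofList (bCellsList cols) := by
  unfold bMarks
  have hinner : ∀ (x : Int) (s : PySem.Set (Int × Int)),
      (PySem.List.pyRange 0 (min (PySem.List.len (PySem.List.pyGetD cols x []))
          (PySem.List.len (PySem.List.pyGetD cols (x + 1) [])) - 1) 1).foldl
        (fun s i => if bPairCond (PySem.List.pyGetD cols x [])
            (PySem.List.pyGetD cols (x + 1) []) i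
          then PySem.Set.update s (bBlock x i) else s) s
      = PySem.Set.update s (((PySem.List.pyRange 0
            (min (PySem.List.len (PySem.List.pyGetD cols x []))
              (PySem.List.len (PySem.List.pyGetD cols (x + 1) [])) - 1) 1).filter
          (bPairCond (PySem.List.pyGetD cols x [])
            (PySem.List.pyGetD cols (x + 1) []))).flatMap (fun i => bBlock x i)) := by
    intro x s
    exact foldl_update_ite_eq _ _ _ _
  have houter := PySem.List.foldl_congr_mem
    (l := PySem.List.pyRange 0 ((cols.length : Int) - 1) 1)
    (init := (PySem.Set.empty : PySem.Set (Int × Int)))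
    (f := fun s x =>
      (PySem.List.pyRange 0 (min (PySem.List.len (PySem.List.pyGetD cols x []))
          (PySem.List.len (PySem.List.pyGetD cols (x + 1) [])) - 1) 1).foldl
        (fun s i => if bPairCond (PySem.List.pyGetD cols x [])
            (PySem.List.pyGetD cols (x + 1) []) i
          then PySem.Set.update s (bBlock x i) else s) s)
    (g := fun s x =>
      PySem.Set.update s (((PySem.List.pyRange 0
            (min (PySem.List.len (PySem.List.pyGetD cols x []))
              (PySem.List.len (PySem.List.pyGetD cols (x + 1) [])) - 1) 1).filter
          (bPairCond (PySem.List.pyGetD cols x [])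
            (PySem.List.pyGetD cols (x + 1) []))).flatMap (fun i => bBlock x i)))
    (fun s x _ => hinner x s)
  rw [houter, foldl_update_eq]
  rw [show (PySem.Set.empty : PySem.Set (Int × Int)) = [] from rfl,
    PySem.Set.update_nil_left, bCellsList]

lemma mem_bCellsList (cols : List (List Char)) (p : Int × Int) :
    p ∈ bCellsList cols ↔ ∃ x i : Int, 0 ≤ x ∧ x < (cols.length : Int) - 1 ∧ 0 ≤ i ∧
      i < min (PySem.List.len (PySem.List.pyGetD cols x []))
          (PySem.List.len (PySem.List.pyGetD cols (x + 1) [])) - 1 ∧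
      bPairCond (PySem.List.pyGetD cols x []) (PySem.List.pyGetD cols (x + 1) []) i = true ∧
      p ∈ bBlock x i := by
  unfold bCellsList
  simp only [List.mem_flatMap, List.mem_filter, PySem.List.mem_pyRange_one]
  constructor
  · rintro ⟨x, ⟨hx0, hx1⟩, i, ⟨⟨hi0, hi1⟩, hc⟩, hp⟩
    exact ⟨x, i, hx0, hx1, hi0, hi1, hc, hp⟩
  · rintro ⟨x, i, hx0, hx1, hi0, hi1, hc, hp⟩
    exact ⟨x, ⟨hx0, hx1⟩, i, ⟨⟨hi0, hi1⟩, hc⟩, hp⟩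

lemma mem_cellsList (m n : Int) (g : Grid) (p : Int × Int) :
    p ∈ cellsList m n g ↔ ∃ y x : Int, 0 ≤ y ∧ y < m - 1 ∧ 0 ≤ x ∧ x < n - 1 ∧
      condA g y x = true ∧ p ∈ blockCellsB y x := by
  rw [cellsList_eq']
  simp only [List.mem_flatMap, List.mem_filter, PySem.List.mem_pyRange_one]
  constructor
  · rintro ⟨y, ⟨hy0, hy1⟩, x, ⟨⟨hx0, hx1⟩, hc⟩, hp⟩
    exact ⟨y, x, hy0, hy1, hx0, hx1, hc, hp⟩
  · rintro ⟨y, x, hy0, hy1, hx0, hx1, hc, hp⟩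
    exact ⟨y, ⟨hy0, hy1⟩, x, ⟨⟨hx0, hx1⟩, hc⟩, hp⟩

-- the loop invariant: cols are the bottom-up '0'-free column stacks of the window of g
def InvC (M N : Nat) (g : Grid) (cols : List (List Char)) : Prop :=
  cols.length = N ∧
  ∀ x : Nat, x < N →
    (cols.getD x []).length ≤ M ∧
    (∀ ch ∈ cols.getD x [], ch ≠ '0') ∧
    (∀ y : Nat, y < M → ggetN g y x = (cols.getD x []).getD (M - 1 - y) '0')

lemma getD_oob {α : Type} (l : List α) {k : Nat} (d : α) (h : l.length ≤ k) :
    l.getD k d = d := by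
  rw [List.getD_eq_getElem?_getD, List.getElem?_eq_none (by omega)]
  rfl

lemma getD_valid_mem {α : Type} [Inhabited α] (l : List α) {k : Nat} (d : α)
    (h : k < l.length) : l.getD k d ∈ l := by
  rw [List.getD_eq_getElem _ _ h]
  exact List.getElem_mem h

lemma condA_iff {M N : Nat} {g : Grid} {cols : List (List Char)}
    (hInv : InvC M N g cols) {x y : Nat} (hx : x + 1 < N) (hy : y + 1 < M) :
    (condA g (y : Int) (x : Int) = true ↔
      (bPairCond (cols.getD x []) (cols.getD (x + 1) []) ((M - 2 - y : Nat) : Int) = true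
        ∧ (M - 2 - y) + 1 < min (cols.getD x []).length (cols.getD (x + 1) []).length)) := by
  obtain ⟨hlenA, hentsA, hptA⟩ := hInv.2 x (by omega)
  obtain ⟨hlenB, hentsB, hptB⟩ := hInv.2 (x + 1) hx
  set a := cols.getD x [] with ha
  set b := cols.getD (x + 1) [] with hb
  set i : Nat := M - 2 - y with hi
  have e1 : gget g (y : Int) (x : Int) = a.getD (i + 1) '0' := by
    rw [gget_natCast, hptA y (by omega)]
    congr 1
    omega
  have e2 : gget g (y : Int) ((x : Int) + 1) = b.getD (i + 1) '0' := by
    rw [show (x : Int) + 1 = ((x + 1 : Nat) : Int) by push_cast; ring, gget_natCast,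
      hptB y (by omega)]
    congr 1
    omega
  have e3 : gget g ((y : Int) + 1) (x : Int) = a.getD i '0' := by
    rw [show (y : Int) + 1 = ((y + 1 : Nat) : Int) by push_cast; ring, gget_natCast,
      hptA (y + 1) (by omega)]
    congr 1
    omega
  have e4 : gget g ((y : Int) + 1) ((x : Int) + 1) = b.getD i '0' := by
    rw [show (y : Int) + 1 = ((y + 1 : Nat) : Int) by push_cast; ring,
      show (x : Int) + 1 = ((x + 1 : Nat) : Int) by push_cast; ring, gget_natCast,
      hptB (y + 1) (by omega)]
    congr 1
    omega
  have hpair : bPairCond a b ((i : Nat) : Int)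
      = (a.getD i '0' == a.getD (i + 1) '0' && a.getD (i + 1) '0' == b.getD i '0'
          && b.getD i '0' == b.getD (i + 1) '0') := by
    unfold bPairCond
    rw [show ((i : Nat) : Int) + 1 = ((i + 1 : Nat) : Int) by push_cast; ring]
    simp only [PySem.List.pyGetD_natCast]
  rw [← cond4_eq, e1, e2, e3, e4, hpair]
  constructor
  · intro h
    simp only [Bool.and_eq_true, bne_iff_ne, beq_iff_eq, ne_eq] at h
    obtain ⟨⟨⟨hne, hr⟩, hd⟩, hdg⟩ := h
    have hia : i + 1 < a.length := by
      by_contra hle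
      exact hne (getD_oob a '0' (by omega))
    have hib : i + 1 < b.length := by
      by_contra hle
      rw [hr] at hne
      exact hne (getD_oob b '0' (by omega))
    constructor
    · simp only [Bool.and_eq_true, beq_iff_eq]
      exact ⟨⟨hd.symm, hdg⟩, by rw [← hdg, hr]⟩
    · exact lt_min_iff.mpr ⟨hia, hib⟩
  · rintro ⟨hbp, hmin⟩
    obtain ⟨hia, hib⟩ := lt_min_iff.mp hmin
    simp only [Bool.and_eq_true, beq_iff_eq] at hbp
    obtain ⟨⟨h1, h2⟩, h3⟩ := hbp
    have hne : a.getD (i + 1) '0' ≠ '0' :=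
      hentsA _ (getD_valid_mem a '0' (by omega))
    simp only [Bool.and_eq_true, bne_iff_ne, beq_iff_eq, ne_eq]
    exact ⟨⟨⟨hne, h2.trans h3⟩, h1.symm⟩, h2⟩

-- the coordinate bijection (row, col) ↦ (col, height)
def phiC (m : Int) (p : Int × Int) : Int × Int := (p.2, m - 1 - p.1)

lemma phiC_inj (m : Int) : Function.Injective (phiC m) := by
  intro p q h
  obtain ⟨p1, p2⟩ := p
  obtain ⟨q1, q2⟩ := q
  have h' : ((p2 : Int), m - 1 - p1) = ((q2 : Int), m - 1 - q1) := h
  injection h' with h1 h2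
  simp only [Prod.mk.injEq]
  omega

lemma phi_psi (m : Int) (q : Int × Int) : phiC m (m - 1 - q.2, q.1) = q := by
  obtain ⟨q1, q2⟩ := q
  show ((q1 : Int), m - 1 - (m - 1 - q2)) = (q1, q2)
  simp only [Prod.mk.injEq]
  constructor
  · trivial
  · omega

lemma mem_cells_iff_marks {M N : Nat} {m n : Int} (hm : m = (M : Int)) (hn : n = (N : Int))
    {g : Grid} {cols : List (List Char)} (hInv : InvC M N g cols) (p : Int × Int) :
    p ∈ cellsList m n g ↔ phiC m p ∈ bCellsList cols := by
  rw [mem_cellsList, mem_bCellsList]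
  constructor
  · rintro ⟨y, x, hy0, hy1, hx0, hx1, hc, hp⟩
    set Y : Nat := y.toNat with hY
    set X : Nat := x.toNat with hX
    have hyY : y = (Y : Int) := by omega
    have hxX : x = (X : Int) := by omega
    have hXN : X + 1 < N := by omega
    have hYM : Y + 1 < M := by omega
    rw [hyY, hxX] at hc
    obtain ⟨hbp, hmin⟩ := (condA_iff hInv hXN hYM).mp hc
    have hgetA : PySem.List.pyGetD cols ((X : Nat) : Int) [] = cols.getD X [] := by
      simp only [PySem.List.pyGetD_natCast]
    have hgetB : PySem.List.pyGetD cols (((X : Nat) : Int) + 1) [] = cols.getD (X + 1) [] := by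
      rw [show ((X : Nat) : Int) + 1 = ((X + 1 : Nat) : Int) by push_cast; ring]
      simp only [PySem.List.pyGetD_natCast]
    obtain ⟨hminA, hminB⟩ := lt_min_iff.mp hmin
    refine ⟨(X : Int), ((M - 2 - Y : Nat) : Int), by omega, ?_, by omega, ?_, ?_, ?_⟩
    · rw [hInv.1]; omega
    · rw [hgetA, hgetB]
      simp only [PySem.List.len_eq]
      have hlow : ((M - 2 - Y : Nat) : Int) + 2
          ≤ min ((cols.getD X []).length : Int) ((cols.getD (X + 1) []).length : Int) :=
        le_min (by omega) (by omega)
      omega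
    · rw [hgetA, hgetB]; exact hbp
    · simp only [blockCellsB, List.mem_cons, List.not_mem_nil, or_false] at hp
      rcases hp with rfl | rfl | rfl | rfl <;>
        simp only [phiC, bBlock, List.mem_cons, List.not_mem_nil, or_false, Prod.ext_iff] <;>
        omega
  · rintro ⟨x, i, hx0, hx1, hi0, hi1, hbp, hp⟩
    set X : Nat := x.toNat with hX
    set I : Nat := i.toNat with hI
    have hxX : x = (X : Int) := by omega
    have hiI : i = (I : Int) := by omega
    have hXlen : (X : Int) < (cols.length : Int) - 1 := by omega
    have hXN : X + 1 < N := by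
      have := hInv.1; omega
    have hgetA : PySem.List.pyGetD cols x [] = cols.getD X [] := by
      rw [hxX]; simp [PySem.List.pyGetD_natCast]
    have hgetB : PySem.List.pyGetD cols (x + 1) [] = cols.getD (X + 1) [] := by
      rw [hxX, show ((X : Nat) : Int) + 1 = ((X + 1 : Nat) : Int) by push_cast; ring]
      simp only [PySem.List.pyGetD_natCast]
    rw [hgetA, hgetB] at hi1 hbp
    simp only [PySem.List.len_eq] at hi1
    have hmla : min ((cols.getD X []).length : Int) ((cols.getD (X + 1) []).length : Int)
        ≤ ((cols.getD X []).length : Int) := min_le_left _ _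
    have hmlb : min ((cols.getD X []).length : Int) ((cols.getD (X + 1) []).length : Int)
        ≤ ((cols.getD (X + 1) []).length : Int) := min_le_right _ _
    have hIA : I + 1 < (cols.getD X []).length := by omega
    have hIB : I + 1 < (cols.getD (X + 1) []).length := by omega
    have hXN : X + 1 < N := by
      have := hInv.1
      omega
    have hlenA := (hInv.2 X (by omega)).1
    have hIM : I + 1 < M := by omega
    set Y : Nat := M - 2 - I with hY
    have hYM : Y + 1 < M := by omega
    have hIY : M - 2 - Y = I := by omega
    have hc : condA g ((Y : Nat) : Int) ((X : Nat) : Int) = true := by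
      refine (condA_iff hInv hXN hYM).mpr ⟨?_, ?_⟩
      · rw [hIY, ← hiI]; exact hbp
      · rw [hIY, lt_min_iff]; exact ⟨hIA, hIB⟩
    refine ⟨(Y : Int), (X : Int), by omega, by omega, by omega, by omega, hc, ?_⟩
    simp only [bBlock, List.mem_cons, List.not_mem_nil, or_false] at hp
    obtain ⟨p1, p2⟩ := p
    simp only [phiC, Prod.ext_iff] at hp
    simp only [blockCellsB, List.mem_cons, List.not_mem_nil, or_false, Prod.ext_iff]
    omega

lemma set_len_eq {m : Int} {L1 L2 : List (Int × Int)}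
    (h : ∀ p, p ∈ L1 ↔ phiC m p ∈ L2) :
    (PySem.Set.ofList L1).length = (PySem.Set.ofList L2).length := by
  have n1 : (PySem.Set.ofList L1).Nodup := PySem.Set.nodup_ofList L1
  have n2 : (PySem.Set.ofList L2).Nodup := PySem.Set.nodup_ofList L2
  have f1 : (PySem.Set.ofList L1).toFinset = L1.toFinset := by
    ext q
    simp [List.mem_toFinset, PySem.Set.mem_ofList]
  have f2 : (PySem.Set.ofList L2).toFinset = L2.toFinset := by
    ext q
    simp [List.mem_toFinset, PySem.Set.mem_ofList]
  have himg : L2.toFinset = L1.toFinset.image (phiC m) := by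
    ext q
    simp only [List.mem_toFinset, Finset.mem_image]
    constructor
    · intro hq
      exact ⟨(m - 1 - q.2, q.1), (h _).mpr (by rw [phi_psi]; exact hq), phi_psi m q⟩
    · rintro ⟨p, hp, rfl⟩
      exact (h p).mp hp
  have c1 : (PySem.Set.ofList L1).toFinset.card = (PySem.Set.ofList L1).length :=
    List.toFinset_card_of_nodup n1
  have c2 : (PySem.Set.ofList L2).toFinset.card = (PySem.Set.ofList L2).length :=
    List.toFinset_card_of_nodup n2
  rw [← c1, ← c2, f1, f2, himg, Finset.card_image_of_injective _ (phiC_inj m)]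

lemma nil_iff_of_bij {m : Int} {L1 L2 : List (Int × Int)}
    (h : ∀ p, p ∈ L1 ↔ phiC m p ∈ L2) : (L1 = [] ↔ L2 = []) := by
  constructor
  · intro h1
    by_contra h2
    obtain ⟨q, hq⟩ := List.exists_mem_of_ne_nil _ h2
    have : (m - 1 - q.2, q.1) ∈ L1 := (h _).mpr (by rw [phi_psi]; exact hq)
    rw [h1] at this
    simp at this
  · intro h2
    by_contra h1
    obtain ⟨p, hp⟩ := List.exists_mem_of_ne_nil _ h1
    have : phiC m p ∈ L2 := (h p).mp hp
    rw [h2] at this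
    simp at this

lemma getD_reverse {α : Type} [Inhabited α] (l : List α) (d : α) {k : Nat}
    (hk : k < l.length) :
    l.reverse.getD k d = l.getD (l.length - 1 - k) d := by
  rw [List.getD_eq_getElem _ _ (by simpa using hk), List.getD_eq_getElem _ _ (by omega),
    List.getElem_reverse]

lemma padded_getD (k : List Char) (M y : Nat) (hk : k.length ≤ M) (hy : y < M) :
    (List.replicate (M - k.length) '0' ++ k).getD y '0' = k.reverse.getD (M - 1 - y) '0' := by
  by_cases h : y < M - k.length
  · rw [List.getD_eq_getElem?_getD, List.getElem?_append_left (by simpa using h)]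
    rw [List.getElem?_replicate, if_pos h]
    rw [getD_oob k.reverse '0' (by simp; omega)]
    rfl
  · have h1 : M - k.length ≤ y := by omega
    have hkpos : 0 < k.length := by omega
    rw [List.getD_eq_getElem?_getD,
      List.getElem?_append_right (by simpa using h1)]
    rw [List.length_replicate]
    rw [getD_reverse k '0' (show M - 1 - y < k.length by omega)]
    rw [show k.length - 1 - (M - 1 - y) = y - (M - k.length) by omega]
    rw [← List.getD_eq_getElem?_getD]

lemma map_range_reverse {α : Type} (f : Nat → α) (M : Nat) :
    (List.range M).map f = ((List.range M).map (fun i => f (M - 1 - i))).reverse := by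
  apply List.ext_getElem (by simp)
  intro i h1 h2
  simp only [List.length_map, List.length_range] at h1
  rw [List.getElem_reverse]
  simp only [List.getElem_map, List.getElem_range, List.length_map, List.length_range]
  congr 1
  omega

lemma bFilterCols_length (marks : PySem.Set (Int × Int)) (cols : List (List Char)) :
    (bFilterCols marks cols).length = cols.length := by
  simp [bFilterCols, PySem.List.length_enumerate]

lemma bFilterCols_getD (marks : PySem.Set (Int × Int)) (cols : List (List Char)) {x : Nat}
    (hx : x < cols.length) :
    (bFilterCols marks cols).getD x []
      = ((List.range (cols.getD x []).length).filter
            (fun i : Nat => !(PySem.Set.contains marks ((x : Int), (i : Int))))).map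
          (fun i : Nat => (cols.getD x []).getD i '0') := by
  have hx' : x < (bFilterCols marks cols).length := by
    rw [bFilterCols_length]; exact hx
  rw [List.getD_eq_getElem _ _ hx']
  unfold bFilterCols
  rw [List.getElem_map]
  rw [PySem.List.getElem_enumerate]
  simp only [Nat.cast_id, zero_add]
  have hcx : cols[x] = cols.getD x [] := (List.getD_eq_getElem _ _ hx).symm
  rw [hcx]
  set cx := cols.getD x [] with hcxd
  rw [PySem.List.enumerate_eq_map_pyRange (d := '0')]
  rw [show PySem.List.len cx = ((cx.length : Nat) : Int) from by simp,
    PySem.List.pyRange_zero_natCast]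
  rw [List.map_map, List.filter_map, List.map_map]
  refine congrArg₂ List.map ?_ ?_
  · funext i
    simp only [Function.comp_apply, PySem.List.pyGetD_natCast]
  · apply List.filter_congr
    intro i _
    simp only [Function.comp_apply, PySem.List.pyGetD_natCast]

lemma step_main {M N : Nat} {m n : Int} (hm : m = (M : Int)) (hn : n = (N : Int))
    (hM : 2 ≤ M) {g : Grid} {cols : List (List Char)}
    (hWF : WFA M N g) (hInv : InvC M N g cols) :
    WFA M N (downA m n (clearGrid g (PySem.Set.ofList (cellsList m n g))))
    ∧ InvC M N (downA m n (clearGrid g (PySem.Set.ofList (cellsList m n g))))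
        (bFilterCols (bMarks cols) cols) := by
  set S := PySem.Set.ofList (cellsList m n g) with hS
  have hSin : ∀ q ∈ S, InB g q := by
    intro q hq
    exact (cells_mem hm hn hWF q ((PySem.Set.mem_ofList _ _).mp hq)).1
  have hWFc : WFA M N (clearGrid g S) := by
    obtain ⟨h1, h2⟩ := shape_clearGrid g S hSin
    exact ⟨by rw [h1]; exact hWF.1, fun y hy => by rw [h2 y]; exact hWF.2 y hy⟩
  obtain ⟨hWFd, hdown⟩ := downA_spec hm hn hM _ hWFc
  refine ⟨hWFd, ?_, ?_⟩
  · rw [bFilterCols_length, hInv.1]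
  intro x hx
  obtain ⟨hlenx, hentsx, hptx⟩ := hInv.2 x hx
  set cx := cols.getD x [] with hcx
  have hmemtr : ∀ i : Nat, i < M →
      ((((M - 1 - i : Nat) : Int), (x : Int)) ∈ S
        ↔ PySem.Set.contains (bMarks cols) ((x : Int), (i : Int)) = true) := by
    intro i hi
    rw [PySem.Set.contains_iff, bMarks_eq, PySem.Set.mem_ofList, PySem.Set.mem_ofList,
      mem_cells_iff_marks hm hn hInv]
    have hphi : phiC m ((((M - 1 - i : Nat) : Int), (x : Int))) = ((x : Int), (i : Int)) := by
      simp only [phiC, Prod.mk.injEq]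
      constructor
      · trivial
      · omega
    rw [hphi]
  set q : Nat → Bool := fun i => !(PySem.Set.contains (bMarks cols) ((x : Int), (i : Int)))
    with hq
  have hnewcol : (bFilterCols (bMarks cols) cols).getD x []
      = ((List.range cx.length).filter q).map (fun i : Nat => cx.getD i '0') :=
    bFilterCols_getD _ _ (by rw [hInv.1]; exact hx)
  set newcx := ((List.range cx.length).filter q).map (fun i : Nat => cx.getD i '0') with hnew
  have hnewlen : newcx.length ≤ M := by
    rw [hnew, List.length_map]
    calc (List.filter q (List.range cx.length)).length
        ≤ (List.range cx.length).length := List.length_filter_le _ _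
      _ = cx.length := List.length_range
      _ ≤ M := hlenx
  have hnewents : ∀ ch ∈ newcx, ch ≠ '0' := by
    intro ch hch
    rw [hnew] at hch
    simp only [List.mem_map, List.mem_filter, List.mem_range] at hch
    obtain ⟨i, ⟨hi, _⟩, rfl⟩ := hch
    exact hentsx _ (getD_valid_mem cx '0' hi)
  refine ⟨by rw [hnewcol]; exact hnewlen, by rw [hnewcol]; exact hnewents, ?_⟩
  intro y hy
  rw [hdown y x hy hx, hnewcol]
  set colC := (List.range M).map (fun yy => ggetN (clearGrid g S) yy x) with hcolC
  set gC : Nat → Char :=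
    fun i => if ((((M - 1 - i : Nat) : Int), (x : Int)) ∈ S) then '0' else cx.getD i '0'
    with hgC
  have hcc : colC = ((List.range M).map gC).reverse := by
    rw [hcolC, map_range_reverse (fun yy => ggetN (clearGrid g S) yy x) M]
    congr 1
    apply List.map_congr_left
    intro i hi
    rw [List.mem_range] at hi
    rw [ggetN_clearGrid g S hSin (M - 1 - i) x]
    simp only [hgC]
    by_cases hmem : ((((M - 1 - i : Nat)) : Int), (x : Int)) ∈ S
    · rw [if_pos hmem, if_pos hmem]
    · rw [if_neg hmem, if_neg hmem, hptx (M - 1 - i) (by omega)]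
      congr 1
      omega
  have hlenC : colC.length = M := by simp [hcolC]
  have hkF : (keepF colC).length ≤ M := by
    calc (keepF colC).length ≤ colC.length := length_keepF_le _
      _ = M := hlenC
  have hsettle : (settle colC).getD y '0' = (keepF colC).reverse.getD (M - 1 - y) '0' := by
    unfold settle
    rw [hlenC]
    exact padded_getD (keepF colC) M y hkF hy
  have hkey : keepF colC = newcx.reverse := by
    rw [hcc]
    unfold keepF
    rw [List.filter_reverse]
    congr 1
    rw [show M = cx.length + (M - cx.length) by omega, List.range_add, List.map_append,
      List.filter_append, List.map_map]
    have htail : List.filter (fun ch => ch != '0')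
        ((List.range (M - cx.length)).map (gC ∘ fun j => cx.length + j)) = [] := by
      rw [List.filter_eq_nil_iff]
      intro ch hch
      simp only [List.mem_map, Function.comp_apply, List.mem_range] at hch
      obtain ⟨j, _, rfl⟩ := hch
      have : gC (cx.length + j) = '0' := by
        rw [hgC]
        simp only []
        rw [getD_oob cx '0' (by omega)]
        exact ite_self '0'
      rw [this]
      simp
    rw [htail, List.append_nil, List.filter_map]
    have hpq : ∀ i ∈ List.range cx.length,
        ((fun ch => ch != '0') ∘ gC) i = q i := by
      intro i hi
      rw [List.mem_range] at hi
      by_cases hmem : ((((M - 1 - i : Nat)) : Int), (x : Int)) ∈ S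
      · have hCtrue : PySem.Set.contains (bMarks cols) ((x : Int), (i : Int)) = true :=
          (hmemtr i (by omega)).mp hmem
        simp only [Function.comp_apply, hgC, if_pos hmem, hq, hCtrue]
        simp
      · have hCfalse : PySem.Set.contains (bMarks cols) ((x : Int), (i : Int)) = false := by
          cases hb : PySem.Set.contains (bMarks cols) ((x : Int), (i : Int)) with
          | false => rfl
          | true => exact absurd ((hmemtr i (by omega)).mpr hb) hmem
        have hne := hentsx _ (getD_valid_mem cx '0' hi)
        have hne' : cx[i]?.getD '0' ≠ '0' := by
          rw [← List.getD_eq_getElem?_getD]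
          exact hne
        simp only [Function.comp_apply, hgC, if_neg hmem, hq, hCfalse]
        simp [hne']
    rw [List.filter_congr hpq, hnew]
    apply List.map_congr_left
    intro i hi
    simp only [List.mem_filter, List.mem_range] at hi
    obtain ⟨hi1, hi2⟩ := hi
    have hmem : ((((M - 1 - i : Nat)) : Int), (x : Int)) ∉ S := by
      intro h
      have := (hmemtr i (by omega)).mp h
      rw [hq] at hi2
      simp only [this] at hi2
      simp at hi2
    rw [hgC]
    simp only []
    rw [if_neg hmem]
  rw [hsettle, hkey, List.reverse_reverse, hnew]

lemma loop_eq {M N : Nat} {m n : Int} (hm : m = (M : Int)) (hn : n = (N : Int)) (hM : 2 ≤ M) :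
    ∀ (fuel : Nat) (ans : Int) (g : Grid) (cols : List (List Char)),
    WFA M N g → InvC M N g cols →
    loopA m n fuel ans g = loopB fuel ans cols := by
  intro fuel
  induction fuel with
  | zero => intros; rfl
  | succ fuel ih =>
    intro ans g cols hWF hInv
    have hiff : ∀ p, p ∈ cellsList m n g ↔ phiC m p ∈ bCellsList cols :=
      fun p => mem_cells_iff_marks hm hn hInv p
    have hmarks := bMarks_eq cols
    by_cases hnil : cellsList m n g = []
    · have hbnil : bCellsList cols = [] := (nil_iff_of_bij hiff).mp hnil
      have hplay := playA_spec hm hn hWF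
      rw [if_pos hnil] at hplay
      simp only [loopA, loopB]
      rw [hplay, hmarks, hbnil]
      norm_num [PySem.Set.ofList]
    · have hbne : bCellsList cols ≠ [] := fun h => hnil ((nil_iff_of_bij hiff).mpr h)
      obtain ⟨p0, hp0⟩ := List.exists_mem_of_ne_nil _ hnil
      have hlen := set_len_eq (m := m) hiff
      have hplay := playA_spec hm hn hWF
      rw [if_neg hnil] at hplay
      have hpos : 0 < (PySem.Set.ofList (cellsList m n g)).length := by
        rw [List.length_pos_iff]
        intro h
        have := (PySem.Set.mem_ofList _ _).mpr hp0
        rw [h] at this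
        simp at this
      have hmne : ¬ bMarks cols = [] := by
        rw [hmarks]
        intro h
        have := (PySem.Set.mem_ofList _ _).mpr ((hiff p0).mp hp0)
        rw [h] at this
        simp at this
      obtain ⟨hWF', hInv'⟩ := step_main hm hn hM hWF hInv
      simp only [loopA, loopB]
      have hposI : (0 : Int) < ((PySem.Set.ofList (cellsList m n g)).length : Int) := by
        exact_mod_cast hpos
      rw [hplay, if_neg hmne,
        if_pos (show ((((PySem.Set.ofList (cellsList m n g)).length : Int)),
            downA m n (clearGrid g (PySem.Set.ofList (cellsList m n g)))).1 > 0 from hposI)]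
      have hcnt : ((PySem.Set.ofList (cellsList m n g)).length : Int)
          = PySem.Set.len (bMarks cols) := by
        rw [hmarks]
        simp [PySem.Set.len, hlen]
      show loopA m n fuel (ans + ((PySem.Set.ofList (cellsList m n g)).length : Int)) _
          = loopB fuel (ans + PySem.Set.len (bMarks cols)) _
      rw [hcnt]
      exact ih _ _ _ hWF' hInv'

-- ===== trivial cases =====

lemma bMarks_nil_short (cols : List (List Char))
    (h : cols.length ≤ 1 ∨ ∀ c ∈ cols, c.length ≤ 1) : bMarks cols = [] := by
  rcases h with h | h
  · unfold bMarks
    rw [pyRange_one_nil (show (cols.length : Int) - 1 ≤ 0 by omega)]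
    rfl
  · unfold bMarks
    rw [PySem.List.foldl_congr_mem (g := fun s _ => s)]
    · induction (PySem.List.pyRange 0 ((cols.length : Int) - 1) 1) with
      | nil => rfl
      | cons a t ihh => simpa using ihh
    · intro s x hxmem
      rw [PySem.List.mem_pyRange_one] at hxmem
      have hxlt : x.toNat < cols.length := by omega
      have hax : PySem.List.pyGetD cols x [] = cols.getD x.toNat [] := by
        conv_lhs => rw [show x = ((x.toNat : Nat) : Int) by omega]
        rw [PySem.List.pyGetD_natCast]
      have hshort : (cols.getD x.toNat []).length ≤ 1 := h _ (getD_valid_mem cols [] hxlt)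
      have hnil : PySem.List.pyRange 0 (min (PySem.List.len (PySem.List.pyGetD cols x []))
          (PySem.List.len (PySem.List.pyGetD cols (x + 1) [])) - 1) 1 = [] := by
        apply pyRange_one_nil
        rw [hax]
        simp only [PySem.List.len_eq]
        have := min_le_left (((cols.getD x.toNat []).length : Int))
          (PySem.List.len (PySem.List.pyGetD cols (x + 1) []))
        omega
      show (PySem.List.pyRange 0 (min (PySem.List.len (PySem.List.pyGetD cols x []))
          (PySem.List.len (PySem.List.pyGetD cols (x + 1) [])) - 1) 1).foldl
          (fun s i => if bPairCond (PySem.List.pyGetD cols x [])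
              (PySem.List.pyGetD cols (x + 1) []) i
            then PySem.Set.update s (bBlock x i) else s) s = s
      rw [hnil]
      rfl

lemma trivial_eq (m n : Int) (board : List String) (hmn : m ≤ 1 ∨ n ≤ 1) :
    solution m n board = solution_alt m n board := by
  have hA : solution m n board = 0 := by
    unfold solution
    simp only [loopA]
    rw [playA_trivial hmn]
    norm_num
  have hshort : (bCols m n board).length ≤ 1 ∨ ∀ c ∈ bCols m n board, c.length ≤ 1 := by
    rcases hmn with h | h
    · right
      intro c hc
      simp only [bCols, List.mem_map] at hc
      obtain ⟨x, _, rfl⟩ := hc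
      rw [List.length_map]
      have h1 := List.length_filter_le (fun row =>
        decide (x < (row.length : Int)) && (PySem.List.pyGetD row x '0' != '0'))
        (bRows m n board).reverse
      have h2 : (bRows m n board).reverse.length = (bRows m n board).length := by simp
      have h3 : (bRows m n board).length ≤ 1 := by
        unfold bRows
        rw [List.length_map, List.length_take]
        have h4 : (max m 0).toNat ≤ 1 := by omega
        have := Nat.min_le_left (max m 0).toNat board.length
        omega
      omega
    · left
      unfold bCols
      rw [List.length_map, PySem.List.length_pyRange_one]
      have : bWidth n (bRows m n board) ≤ n := min_le_left _ _
      omega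
  have hB : solution_alt m n board = 0 := by
    unfold solution_alt
    simp only [loopB]
    rw [bMarks_nil_short _ hshort]
    simp
  rw [hA, hB]

-- ===== initial state =====

lemma foldl_max_all_eq (v : Int) :
    ∀ (l : List (List Char)) (acc : Int), (∀ r ∈ l, PySem.List.len r = v) → acc ≤ v →
    l ≠ [] → l.foldl (fun acc r => max acc (PySem.List.len r)) acc = v := by
  intro l
  induction l with
  | nil => intro acc _ _ hne; exact absurd rfl hne
  | cons r t ih =>
    intro acc hall hacc _
    rw [List.foldl_cons, hall r (by simp), max_eq_right hacc]
    rcases t with _ | ⟨s, t'⟩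
    · rfl
    · exact ih v (fun r' hr' => hall r' (by simp [hr'])) le_rfl (by simp)

lemma init_inv {M N : Nat} {m n : Int} (hm : m = (M : Int)) (hn : n = (N : Int))
    (hM : 2 ≤ M) (hN : 2 ≤ N) (board : List String)
    (hb : M ≤ board.length)
    (hrows : ∀ s ∈ board.take M, N ≤ s.length ∧ '0' ∉ s.toList.take N) :
    WFA M N (board.map (fun s => s.toList))
      ∧ InvC M N (board.map (fun s => s.toList)) (bCols m n board) := by
  have hrowsB : bRows m n board = (board.take M).map (fun r => r.toList.take N) := by
    unfold bRows
    rw [show (max m 0).toNat = M by omega]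
    apply List.map_congr_left
    intro r _
    rw [PySem.Str.toList_slice, PySem.Chars.slice_eq_listSlice,
      PySem.List.slice_to _ (by omega : (0 : Int) ≤ n)]
    rw [show n.toNat = N by omega]
  have hlrows : (bRows m n board).length = M := by
    rw [hrowsB, List.length_map, List.length_take]
    omega
  have hrowlen : ∀ r ∈ bRows m n board, r.length = N := by
    intro r hr
    rw [hrowsB] at hr
    simp only [List.mem_map] at hr
    obtain ⟨s, hs, rfl⟩ := hr
    have h1 := (hrows s hs).1
    rw [List.length_take, String.length_toList]
    omega
  have hzero : ∀ r ∈ bRows m n board, '0' ∉ r := by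
    intro r hr
    rw [hrowsB] at hr
    simp only [List.mem_map] at hr
    obtain ⟨s, hs, rfl⟩ := hr
    exact (hrows s hs).2
  have hwidth : bWidth n (bRows m n board) = (N : Int) := by
    unfold bWidth
    have hne : bRows m n board ≠ [] := by
      intro h
      rw [h] at hlrows
      simp at hlrows
      omega
    rw [foldl_max_all_eq (N : Int) (bRows m n board) 0
      (fun r hr => by simp [PySem.List.len_eq, hrowlen r hr])
      (by exact_mod_cast Nat.zero_le N) hne]
    rw [hn, min_self]
  have hcols : bCols m n board
      = (List.range N).map (fun X => ((bRows m n board).map (fun r => r.getD X '0')).reverse) := by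
    simp only [bCols]
    rw [hwidth, PySem.List.pyRange_zero_natCast, List.map_map]
    apply List.map_congr_left
    intro X hX
    rw [List.mem_range] at hX
    simp only [Function.comp_apply]
    have hguard : ∀ r ∈ (bRows m n board).reverse,
        (decide (((X : Nat) : Int) < (r.length : Int))
          && (PySem.List.pyGetD r ((X : Nat) : Int) '0' != '0')) = true := by
      intro r hr
      rw [List.mem_reverse] at hr
      have hlr := hrowlen r hr
      have hgd : PySem.List.pyGetD r ((X : Nat) : Int) '0' = r.getD X '0' := by
        simp [PySem.List.pyGetD_natCast]
      have hne : r.getD X '0' ≠ '0' := by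
        intro h
        exact hzero r hr (h ▸ getD_valid_mem r '0' (by omega))
      rw [hgd]
      simp only [Bool.and_eq_true, decide_eq_true_eq, bne_iff_ne, ne_eq]
      exact ⟨by exact_mod_cast (by omega : X < r.length), hne⟩
    rw [List.filter_eq_self.mpr hguard]
    rw [show (fun r : List Char => PySem.List.pyGetD r ((X : Nat) : Int) '0')
        = (fun r : List Char => r.getD X '0') from funext (fun r => by
          simp [PySem.List.pyGetD_natCast])]
    exact List.map_reverse
  have hgA0 : ∀ y : Nat, (hy : y < M) →
      (board.map (fun s => s.toList)).getD y [] = (board[y]'(by omega)).toList := by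
    intro y hy
    rw [List.getD_eq_getElem _ _ (by simp; omega), List.getElem_map]
  have hmemtake : ∀ y : Nat, (hy : y < M) → board[y]'(by omega) ∈ board.take M := by
    intro y hy
    have hlt : y < (board.take M).length := by
      rw [List.length_take]
      omega
    have := List.getElem_mem hlt
    rwa [List.getElem_take] at this
  have hWF : WFA M N (board.map (fun s => s.toList)) := by
    refine ⟨by simp; omega, ?_⟩
    intro y hy
    rw [hgA0 y hy, String.length_toList]
    exact (hrows _ (hmemtake y hy)).1
  refine ⟨hWF, ?_, ?_⟩
  · rw [hcols]
    simp
  intro x hx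
  have hcget : (bCols m n board).getD x []
      = ((bRows m n board).map (fun r => r.getD x '0')).reverse := by
    rw [hcols, List.getD_eq_getElem _ _ (by simp; omega), List.getElem_map, List.getElem_range]
  have hclen : ((bCols m n board).getD x []).length = M := by
    rw [hcget]
    simp [hlrows]
  refine ⟨by omega, ?_, ?_⟩
  · intro ch hch
    rw [hcget] at hch
    rw [List.mem_reverse] at hch
    simp only [List.mem_map] at hch
    obtain ⟨r, hr, rfl⟩ := hch
    intro h
    exact hzero r hr (h ▸ getD_valid_mem r '0' (by rw [hrowlen r hr]; omega))
  · intro y hy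
    rw [hcget]
    rw [getD_reverse _ '0' (by simp [hlrows]; omega)]
    rw [List.length_map, hlrows]
    rw [show M - 1 - (M - 1 - y) = y by omega]
    rw [List.getD_eq_getElem _ _ (by simp [hlrows]; omega), List.getElem_map]
    have hry : (bRows m n board)[y]'(by omega) = (board[y]'(by omega)).toList.take N := by
      have : y < ((board.take M).map (fun r => r.toList.take N)).length := by
        simp
        omega
      rw [List.getElem_of_eq hrowsB, List.getElem_map, List.getElem_take]
    rw [hry]
    unfold ggetN
    rw [hgA0 y hy]
    rw [List.getD_eq_getElem?_getD, List.getD_eq_getElem?_getD,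
      List.getElem?_take_of_lt hx]

-- ===== VERDICT (by name: the statement is the Claim_ definition above) =====
theorem solution_spec : Claim_equal_solution := by
  unfold Claim_equal_solution
  intro m n board _ hpre
  unfold Spec_solution
  by_cases hm1 : m ≤ 1
  · exact trivial_eq m n board (Or.inl hm1)
  by_cases hn1 : n ≤ 1
  · exact trivial_eq m n board (Or.inr hn1)
  obtain ⟨hmb, hrows⟩ : m ≤ (board.length : Int)
      ∧ ∀ s ∈ board.take m.toNat, n ≤ (s.length : Int) ∧ '0' ∉ s.toList.take n.toNat := by
    rcases hpre with h | h | h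
    · omega
    · omega
    · exact h
  obtain ⟨M, hm⟩ : ∃ M : Nat, m = (M : Int) := ⟨m.toNat, by omega⟩
  obtain ⟨N, hn⟩ : ∃ N : Nat, n = (N : Int) := ⟨n.toNat, by omega⟩
  have hM : 2 ≤ M := by omega
  have hN : 2 ≤ N := by omega
  have hMt : m.toNat = M := by omega
  have hNt : n.toNat = N := by omega
  rw [hMt, hNt] at hrows
  have hrows' : ∀ s ∈ board.take M, N ≤ s.length ∧ '0' ∉ s.toList.take N := by
    intro s hs
    obtain ⟨h1, h2⟩ := hrows s hs
    exact ⟨by omega, h2⟩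
  obtain ⟨hWF, hInv⟩ := init_inv hm hn hM hN board (by omega) hrows'
  show solution m n board = solution_alt m n board
  unfold solution solution_alt
  exact loop_eq hm hn hM _ 0 _ _ hWF hInv
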